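-- pv_equiv track=rewrite | github.com/hagicode/ItaData_market_tone_ | ItaData_list_app.py | seachfile
-- ===== SOURCE A (Python) =====
-- def seachfile(symbol,list_,date_str_):
--     code = symbol
--     l2 = list_
--     date_str = date_str_
--     if str(code).startswith('1'):
--         filename = [f for f in l2 if "1000s" in f and date_str in f][0]
--     elif str(code).startswith('2'):
--         filename = [f for f in l2 if "2000s" in f and date_str in f][0]
--     elif str(code).startswith('3'):
--         filename = [f for f in l2 if "3000s" in f and date_str in f][0]
--     elif str(code).startswith('4'):
--         filename = [f for f in l2 if "4000s" in f and date_str in f][0]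
--     elif str(code).startswith('5'):
--         filename = [f for f in l2 if "5000s" in f and date_str in f][0]
--     elif str(code).startswith('6'):
--         filename = [f for f in l2 if "6000s" in f and date_str in f][0]
--     elif str(code).startswith('7'):
--         filename = [f for f in l2 if "7000s" in f and date_str in f][0]
--     elif str(code).startswith('8'):
--         filename = [f for f in l2 if "8000s" in f and date_str in f][0]
--     elif str(code).startswith('9'):
--         filename = [f for f in l2 if "9000s" in f and date_str in f][0]
--     return filename
-- ===== SOURCE B (Python) =====
-- def seachfile(symbol, list_, date_str_):
--     # One pass over the files builds an index: for every sector tag digit,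
--     # the first file that contains both that tag and the date.  The answer
--     # is then a dictionary lookup keyed by the symbol's first character.
--     best = {}
--     for f in list_:
--         if date_str_ in f:
--             for d in "123456789":
--                 if d + "000s" in f and d not in best:
--                     best[d] = f
--     first = str(symbol)[:1]
--     if first and first in "123456789":
--         filename = best[first]
--     return filename
-- ===== Notes on version B (the rewrite author's own statement) =====
-- stated objective: alternative
-- what changed: Replaces A's nine branch-specific filtered scans with a single pass that builds a dict index mapping each sector digit to the first file containing its tag and the date, followed by one dictionary lookup keyed by the symbol's first character.
import Mathlib
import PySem

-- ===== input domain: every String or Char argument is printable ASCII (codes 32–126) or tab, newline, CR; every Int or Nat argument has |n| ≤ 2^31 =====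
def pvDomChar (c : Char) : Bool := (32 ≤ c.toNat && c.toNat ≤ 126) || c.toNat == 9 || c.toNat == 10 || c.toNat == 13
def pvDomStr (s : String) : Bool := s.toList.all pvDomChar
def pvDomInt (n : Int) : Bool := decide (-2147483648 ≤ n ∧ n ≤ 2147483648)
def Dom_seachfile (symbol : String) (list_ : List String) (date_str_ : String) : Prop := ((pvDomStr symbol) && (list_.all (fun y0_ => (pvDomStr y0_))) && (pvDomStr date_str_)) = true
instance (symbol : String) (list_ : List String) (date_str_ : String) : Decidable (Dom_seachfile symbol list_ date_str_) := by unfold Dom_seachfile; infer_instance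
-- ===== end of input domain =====

-- B replaces A's nine branch-specific filtered scans by one indexing pass (dict: digit → first
-- matching file) followed by a dictionary lookup (objective: alternative decomposition).
-- Where Python A raises (no digit-1..9 leading char, or no matching file) both ports return "" —
-- those inputs are outside Pre_.

-- ===== PORT A =====
def seachfile (symbol : String) (list_ : List String) (date_str_ : String) : String :=
  let code := symbol
  let l2 := list_
  let date_str := date_str_
  if PySem.Str.startswith code "1" then
    (PySem.List.pyGet? (l2.filter (fun f => PySem.Str.isIn "1000s" f && PySem.Str.isIn date_str f)) 0).getD ""
  else if PySem.Str.startswith code "2" then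
    (PySem.List.pyGet? (l2.filter (fun f => PySem.Str.isIn "2000s" f && PySem.Str.isIn date_str f)) 0).getD ""
  else if PySem.Str.startswith code "3" then
    (PySem.List.pyGet? (l2.filter (fun f => PySem.Str.isIn "3000s" f && PySem.Str.isIn date_str f)) 0).getD ""
  else if PySem.Str.startswith code "4" then
    (PySem.List.pyGet? (l2.filter (fun f => PySem.Str.isIn "4000s" f && PySem.Str.isIn date_str f)) 0).getD ""
  else if PySem.Str.startswith code "5" then
    (PySem.List.pyGet? (l2.filter (fun f => PySem.Str.isIn "5000s" f && PySem.Str.isIn date_str f)) 0).getD ""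
  else if PySem.Str.startswith code "6" then
    (PySem.List.pyGet? (l2.filter (fun f => PySem.Str.isIn "6000s" f && PySem.Str.isIn date_str f)) 0).getD ""
  else if PySem.Str.startswith code "7" then
    (PySem.List.pyGet? (l2.filter (fun f => PySem.Str.isIn "7000s" f && PySem.Str.isIn date_str f)) 0).getD ""
  else if PySem.Str.startswith code "8" then
    (PySem.List.pyGet? (l2.filter (fun f => PySem.Str.isIn "8000s" f && PySem.Str.isIn date_str f)) 0).getD ""
  else if PySem.Str.startswith code "9" then
    (PySem.List.pyGet? (l2.filter (fun f => PySem.Str.isIn "9000s" f && PySem.Str.isIn date_str f)) 0).getD ""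
  else ""  -- Python: 'filename' unbound → UnboundLocalError; outside Pre_

-- ===== PORT B =====
-- the body of B's inner 'for d in "123456789"' loop
def pvTagStep (f : String) (b : PySem.Dict String String) (d : Char) : PySem.Dict String String :=
  if PySem.Chars.isIn (d :: "000s".toList) f.toList && (PySem.Dict.get? b (String.mk [d])).isNone
  then PySem.Dict.insert b (String.mk [d]) f else b

-- the body of B's 'for f in list_' loop
def pvFileStep (date_str_ : String) (b : PySem.Dict String String) (f : String) : PySem.Dict String String :=
  if PySem.Str.isIn date_str_ f then "123456789".toList.foldl (pvTagStep f) b else b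

def seachfile_alt (symbol : String) (list_ : List String) (date_str_ : String) : String :=
  let best := list_.foldl (pvFileStep date_str_) PySem.Dict.empty
  let first := PySem.List.slice symbol.toList none (some 1)
  if (decide (first ≠ [])) && PySem.Chars.isIn first "123456789".toList then
    (PySem.Dict.get? best (String.mk first)).getD ""  -- Python: best[first]; KeyError → outside Pre_
  else ""  -- Python: 'filename' unbound → UnboundLocalError; outside Pre_

-- ===== PRECONDITION & SPEC =====
-- Pre_ excludes exactly the inputs where Python A raises: a symbol whose first character is not one
-- of '1'..'9' (UnboundLocalError), or no file containing both the tag and the date (IndexError).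
def Pre_seachfile (symbol : String) (list_ : List String) (date_str_ : String) : Prop :=
  ∃ f ∈ list_,
    (match symbol.toList.head? with
     | some c => decide (c ∈ (['1','2','3','4','5','6','7','8','9'] : List Char))
         && PySem.Chars.isIn (c :: ['0','0','0','s']) f.toList
         && PySem.Str.isIn date_str_ f
     | none => false) = true
instance (symbol : String) (list_ : List String) (date_str_ : String) : Decidable (Pre_seachfile symbol list_ date_str_) := by unfold Pre_seachfile; infer_instance

def pvWitness_seachfile : String × List String × String := ("7", ["7000sd"], "d")

def Spec_seachfile (symbol : String) (list_ : List String) (date_str_ : String) (out : String) : Prop := out = seachfile_alt symbol list_ date_str_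
instance (symbol : String) (list_ : List String) (date_str_ : String) (out : String) : Decidable (Spec_seachfile symbol list_ date_str_ out) := by unfold Spec_seachfile; infer_instance

-- ===== CLAIM (what is proved, stated in full; the proofs are below) =====
def Claim_equal_seachfile : Prop := ∀ (symbol : String) (list_ : List String) (date_str_ : String), Dom_seachfile symbol list_ date_str_ → Pre_seachfile symbol list_ date_str_ → Spec_seachfile symbol list_ date_str_ (seachfile symbol list_ date_str_)

-- ===== LEMMAS AND PROOFS =====

-- [0] of a filtered list is find?: characterises A's "[...][0]".
theorem pick_eq {α : Type} (l : List α) (p : α → Bool) (d : α) :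
    (PySem.List.pyGet? (l.filter p) 0).getD d = (l.find? p).getD d := by
  have h : (l.filter p).head? = l.find? p := by
    induction l with
    | nil => rfl
    | cons a t ih => by_cases hp : p a <;> simp [List.find?, hp, ih]
  cases hh : l.filter p <;> simp [PySem.List.pyGet?, PySem.List.pyIdx?, hh, ← h]

-- singleton-string keys are as distinct as their characters
theorem key_ne {c d : Char} (h : c ≠ d) : String.mk [c] ≠ String.mk [d] := by
  intro e
  have h1 : (String.ofList [c]).toList = (String.ofList [d]).toList := congrArg String.toList e
  rw [String.toList_ofList, String.toList_ofList] at h1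
  exact h (List.head_eq_of_cons_eq h1)

-- digits not seen by the inner loop keep their entry
theorem inner_skip (f : String) (ds : List Char) (b : PySem.Dict String String) (c : Char)
    (hc : c ∉ ds) :
    PySem.Dict.get? (ds.foldl (pvTagStep f) b) (String.mk [c]) = PySem.Dict.get? b (String.mk [c]) := by
  induction ds generalizing b with
  | nil => rfl
  | cons d t ih =>
    simp only [List.mem_cons, not_or] at hc
    rw [List.foldl_cons, ih _ hc.2]
    unfold pvTagStep
    split
    · exact PySem.Dict.get?_insert_of_ne _ _ (key_ne hc.1)
    · rfl

-- effect of the whole inner digit loop on one digit's entry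
theorem inner_get (f : String) (ds : List Char) (b : PySem.Dict String String) (c : Char)
    (hc : c ∈ ds) (hnd : ds.Nodup) :
    PySem.Dict.get? (ds.foldl (pvTagStep f) b) (String.mk [c]) =
      if PySem.Chars.isIn (c :: "000s".toList) f.toList
          && (PySem.Dict.get? b (String.mk [c])).isNone
      then some f else PySem.Dict.get? b (String.mk [c]) := by
  induction ds generalizing b with
  | nil => cases hc
  | cons d t ih =>
    rw [List.nodup_cons] at hnd
    rcases List.mem_cons.mp hc with h | h
    · subst h
      rw [List.foldl_cons, inner_skip _ _ _ _ hnd.1]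
      unfold pvTagStep
      split
      · exact PySem.Dict.get?_insert_self _ _ _
      · rfl
    · have hdc : d ≠ c := fun e => hnd.1 (e ▸ h)
      have h1 : PySem.Dict.get? (pvTagStep f b d) (String.mk [c]) = PySem.Dict.get? b (String.mk [c]) := by
        unfold pvTagStep
        split
        · exact PySem.Dict.get?_insert_of_ne _ _ (key_ne (fun e => hdc e.symm))
        · rfl
      rw [List.foldl_cons, ih _ h hnd.2, h1]

-- the outer loop computes, for each digit, the FIRST matching file (first wins)
theorem outer_get (date_str_ : String) (l : List String) (b : PySem.Dict String String) (c : Char)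
    (hc : c ∈ "123456789".toList) :
    PySem.Dict.get? (l.foldl (pvFileStep date_str_) b) (String.mk [c]) =
      (PySem.Dict.get? b (String.mk [c])).or
        (l.find? (fun f => PySem.Chars.isIn (c :: "000s".toList) f.toList
                            && PySem.Str.isIn date_str_ f)) := by
  induction l generalizing b with
  | nil => cases h : PySem.Dict.get? b (String.mk [c]) <;> simp [h]
  | cons f t ih =>
    rw [List.foldl_cons, ih]
    have hstep : PySem.Dict.get? (pvFileStep date_str_ b f) (String.mk [c]) =
        if PySem.Chars.isIn (c :: "000s".toList) f.toList && PySem.Str.isIn date_str_ f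
            && (PySem.Dict.get? b (String.mk [c])).isNone
        then some f else PySem.Dict.get? b (String.mk [c]) := by
      unfold pvFileStep
      by_cases hd : PySem.Str.isIn date_str_ f
      · rw [if_pos hd, inner_get _ _ _ _ hc (by decide), hd]
        by_cases ht : PySem.Chars.isIn (c :: "000s".toList) f.toList
        · rw [ht]; simp
        · simp only [Bool.not_eq_true] at ht; rw [ht]; simp
      · simp only [Bool.not_eq_true] at hd
        rw [if_neg (by rw [hd]; simp), hd]
        simp
    rw [hstep]
    rw [List.find?_cons]
    by_cases hm : PySem.Chars.isIn (c :: "000s".toList) f.toList && PySem.Str.isIn date_str_ f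
    · rw [hm]
      cases hb : PySem.Dict.get? b (String.mk [c]) <;> simp
    · simp only [Bool.not_eq_true] at hm
      rw [hm]
      simp

-- ===== VERDICT (by name: the statement is the Claim_ definition above) =====
theorem seachfile_spec : Claim_equal_seachfile := by
  intro symbol list_ date_str_ _ hpre
  unfold Spec_seachfile
  obtain ⟨f, hf, hb⟩ := hpre
  cases hlist : symbol.toList with
  | nil => rw [hlist] at hb; simp at hb
  | cons c rest => ?_
  rw [hlist] at hb
  simp only [List.head?, Bool.and_eq_true, decide_eq_true_eq] at hb
  have hfind : (list_.find? (fun g => PySem.Chars.isIn (c :: "000s".toList) g.toList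
      && PySem.Str.isIn date_str_ g)).isSome := by
    rw [List.find?_isSome]
    exact ⟨f, hf, by rw [Bool.and_eq_true]; exact ⟨hb.1.2, hb.2⟩⟩
  have hc := hb.1.1
  simp only [List.mem_cons, List.not_mem_nil, or_false] at hc
  have halt : seachfile_alt symbol list_ date_str_ =
      (list_.find? (fun g => PySem.Chars.isIn (c :: "000s".toList) g.toList
        && PySem.Str.isIn date_str_ g)).getD "" := by
    have hcmem : c ∈ "123456789".toList := by
      rcases hc with h|h|h|h|h|h|h|h|h <;> subst h <;> decide
    unfold seachfile_alt
    have hslice : PySem.List.slice symbol.toList none (some 1) = [c] := by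
      rw [hlist]; simp [PySem.List.slice, PySem.List.clampIdx]
    rw [hslice, if_pos (by
      rcases hc with h|h|h|h|h|h|h|h|h <;> subst h <;> decide)]
    rw [outer_get _ _ _ _ hcmem, PySem.Dict.get?_empty, Option.none_or]
  rw [halt]
  rcases hc with h|h|h|h|h|h|h|h|h <;> subst h <;>
    simp [seachfile, hlist, PySem.Str.startswith, PySem.Chars.startswith,
      List.isPrefixOf, pick_eq]
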